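-- pv_equiv track=rewrite | github.com/surajdwivedi0307/surajmetronome | metronomev4.py | parse_notes_input
-- ===== SOURCE A (Python) =====
-- def parse_notes_input(note_string):
--     parsed_sequence = []
--     entry = note_string.strip()
--     i = 0
--     while i < len(entry):
--         if entry[i] in [',', '-']:
--             parsed_sequence.append(('-', 1, 'medium'))
--             i += 1
--         else:
--             note = entry[i]
--             i += 1
--             octave = 'medium'
--             if i < len(entry) and entry[i] == '>':
--                 octave = 'high'
--                 i += 1
--             elif i < len(entry) and entry[i] == '<':
--                 octave = 'low'
--                 i += 1
--             count = 0
--             while i < len(entry) and entry[i] == '_':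
--                 count += 1
--                 i += 1
--             duration = 1 + count
--             parsed_sequence.append((note, duration, octave))
--     return parsed_sequence
-- ===== SOURCE B (Python) =====
-- def parse_notes_input(note_string):
--     # Single state-machine pass over the characters, updating the last emitted
--     # tuple for octave marks and underscores instead of index lookahead.
--     out = []
--     state = 0  # 0: expect new token; 1: octave or underscore may follow; 2: only underscores
--     for ch in note_string.strip():
--         if state >= 1 and ch == '_':
--             n, d, o = out[-1]
--             out[-1] = (n, d + 1, o)
--             state = 2
--         elif state == 1 and (ch == '>' or ch == '<'):
--             n, d, o = out[-1]
--             out[-1] = (n, d, 'high' if ch == '>' else 'low')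
--             state = 2
--         elif ch == ',' or ch == '-':
--             out.append(('-', 1, 'medium'))
--             state = 0
--         else:
--             out.append((ch, 1, 'medium'))
--             state = 1
--     return out
-- ===== Notes on version B (the rewrite author's own statement) =====
-- stated objective: alternative
-- what changed: Replaces A's index-based while loop with inner lookahead loops by a single left-to-right state-machine pass over the characters that patches the last emitted tuple for octave marks and underscores.
import Mathlib
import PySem

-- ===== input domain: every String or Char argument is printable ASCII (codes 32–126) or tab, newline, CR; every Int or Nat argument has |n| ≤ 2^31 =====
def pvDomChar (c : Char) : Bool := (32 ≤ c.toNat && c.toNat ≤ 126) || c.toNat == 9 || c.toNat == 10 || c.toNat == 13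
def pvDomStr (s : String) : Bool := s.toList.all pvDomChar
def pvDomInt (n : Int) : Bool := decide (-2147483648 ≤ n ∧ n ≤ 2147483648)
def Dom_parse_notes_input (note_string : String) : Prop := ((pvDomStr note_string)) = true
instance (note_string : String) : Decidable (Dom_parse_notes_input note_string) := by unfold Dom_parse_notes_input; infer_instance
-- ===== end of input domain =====

-- B replaces A's index-based lookahead loop by a single left-to-right state-machine
-- pass that patches the last emitted tuple (objective: alternative structure, same cost).

-- ===== PORT A =====
-- inner while loop counting consecutive '_' from index i
def pvCountUnd (cs : List Char) (i : Nat) : Nat :=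
  if h : i < cs.length ∧ cs.getD i ' ' = '_' then pvCountUnd cs (i+1) + 1 else 0
termination_by cs.length - i
decreasing_by omega

-- A's outer while loop: state (i, parsed_sequence); branches in A's order
def pvGoA (cs : List Char) (i : Nat) (acc : List (String × Int × String)) :
    List (String × Int × String) :=
  if hi : i < cs.length then
    let c := cs.getD i ' '
    if c = ',' ∨ c = '-' then
      pvGoA cs (i+1) (acc ++ [("-", (1:Int), "medium")])
    else if i+1 < cs.length ∧ cs.getD (i+1) ' ' = '>' then
      pvGoA cs (i+2 + pvCountUnd cs (i+2))
        (acc ++ [(String.mk [c], 1 + (pvCountUnd cs (i+2) : Int), "high")])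
    else if i+1 < cs.length ∧ cs.getD (i+1) ' ' = '<' then
      pvGoA cs (i+2 + pvCountUnd cs (i+2))
        (acc ++ [(String.mk [c], 1 + (pvCountUnd cs (i+2) : Int), "low")])
    else
      pvGoA cs (i+1 + pvCountUnd cs (i+1))
        (acc ++ [(String.mk [c], 1 + (pvCountUnd cs (i+1) : Int), "medium")])
  else acc
termination_by cs.length - i
decreasing_by all_goals omega

def parse_notes_input (note_string : String) : List (String × Int × String) :=
  pvGoA (PySem.Str.strip note_string).toList 0 []

-- ===== PORT B =====
-- Source B's for-loop: state 0 = expect new token, 1 = octave or '_' may follow, 2 = only '_'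
def pvGoB (cs : List Char) (state : Nat) (acc : List (String × Int × String)) :
    List (String × Int × String) :=
  match cs with
  | [] => acc
  | c :: rest =>
    if 1 ≤ state ∧ c = '_' then
      match acc.getLast? with
      | some (n, d, o) => pvGoB rest 2 (acc.dropLast ++ [(n, d + 1, o)])
      | none => pvGoB rest 2 acc      -- unreachable: state ≥ 1 only right after an append
    else if state = 1 ∧ (c = '>' ∨ c = '<') then
      match acc.getLast? with
      | some (n, d, _) => pvGoB rest 2 (acc.dropLast ++ [(n, d, if c = '>' then "high" else "low")])
      | none => pvGoB rest 2 acc      -- unreachable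
    else if c = ',' ∨ c = '-' then
      pvGoB rest 0 (acc ++ [("-", (1:Int), "medium")])
    else
      pvGoB rest 1 (acc ++ [(String.mk [c], (1:Int), "medium")])

def parse_notes_input_alt (note_string : String) : List (String × Int × String) :=
  pvGoB (PySem.Str.strip note_string).toList 0 []

-- ===== PRECONDITION & SPEC =====
def Spec_parse_notes_input (note_string : String) (out : List (String × Int × String)) : Prop := out = parse_notes_input_alt note_string
instance (note_string : String) (out : List (String × Int × String)) : Decidable (Spec_parse_notes_input note_string out) := by unfold Spec_parse_notes_input; infer_instance

-- ===== CLAIM (what is proved, stated in full; the proofs are below) =====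
def Claim_equal_parse_notes_input : Prop := ∀ (note_string : String), Dom_parse_notes_input note_string → Spec_parse_notes_input note_string (parse_notes_input note_string)

-- ===== LEMMAS AND PROOFS =====

lemma pv_drop_cons (cs : List Char) (i : Nat) (hi : i < cs.length) :
    cs.drop i = cs.getD i ' ' :: cs.drop (i+1) := by
  rw [List.getD_eq_getElem _ _ hi]
  exact List.drop_eq_getElem_cons hi

lemma pv_und_stop (cs : List Char) (i : Nat) :
    ¬ (i + pvCountUnd cs i < cs.length ∧ cs.getD (i + pvCountUnd cs i) ' ' = '_') := by
  have H : ∀ n i, cs.length - i ≤ n →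
      ¬ (i + pvCountUnd cs i < cs.length ∧ cs.getD (i + pvCountUnd cs i) ' ' = '_') := by
    intro n
    induction n with
    | zero =>
      intro i h
      rw [pvCountUnd, dif_neg (by omega)]
      rintro ⟨h1, _⟩
      omega
    | succ n ih =>
      intro i h
      by_cases hc : i < cs.length ∧ cs.getD i ' ' = '_'
      · rw [pvCountUnd, dif_pos hc]
        have := ih (i+1) (by omega)
        have e : i + (pvCountUnd cs (i+1) + 1) = (i+1) + pvCountUnd cs (i+1) := by omega
        rw [e]; exact this
      · rw [pvCountUnd, dif_neg hc]
        simpa using hc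
  exact H (cs.length - i) i le_rfl

lemma pv_und_split (cs : List Char) (i : Nat) :
    cs.drop i = List.replicate (pvCountUnd cs i) '_' ++ cs.drop (i + pvCountUnd cs i) := by
  have H : ∀ n i, cs.length - i ≤ n →
      cs.drop i = List.replicate (pvCountUnd cs i) '_' ++ cs.drop (i + pvCountUnd cs i) := by
    intro n
    induction n with
    | zero =>
      intro i h
      rw [pvCountUnd, dif_neg (by omega)]
      simp
    | succ n ih =>
      intro i h
      by_cases hc : i < cs.length ∧ cs.getD i ' ' = '_'
      · rw [pvCountUnd, dif_pos hc]
        rw [pv_drop_cons cs i hc.1, hc.2]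
        have e : i + (pvCountUnd cs (i+1) + 1) = (i+1) + pvCountUnd cs (i+1) := by omega
        rw [e, List.replicate_succ]
        simpa using ih (i+1) (by omega)
      · rw [pvCountUnd, dif_neg hc]
        simp
  exact H (cs.length - i) i le_rfl

-- one-step evaluation lemmas for pvGoB
lemma pv_goB_step_sep (c : Char) (rest : List Char) (acc : List (String × Int × String))
    (hsep : c = ',' ∨ c = '-') :
    pvGoB (c :: rest) 0 acc = pvGoB rest 0 (acc ++ [("-", (1:Int), "medium")]) := by
  rcases hsep with h | h <;> simp [pvGoB, h]

lemma pv_goB_step_note (c : Char) (rest : List Char) (acc : List (String × Int × String))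
    (hsep : ¬ (c = ',' ∨ c = '-')) :
    pvGoB (c :: rest) 0 acc = pvGoB rest 1 (acc ++ [(String.mk [c], (1:Int), "medium")]) := by
  push_neg at hsep
  simp [pvGoB, hsep.1, hsep.2]

lemma pv_goB_step_high (rest : List Char) (n : String) (d : Int) (o : String)
    (t : List (String × Int × String)) :
    pvGoB ('>' :: rest) 1 (t ++ [(n, d, o)]) = pvGoB rest 2 (t ++ [(n, d, "high")]) := by
  simp [pvGoB]

lemma pv_goB_step_low (rest : List Char) (n : String) (d : Int) (o : String)
    (t : List (String × Int × String)) :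
    pvGoB ('<' :: rest) 1 (t ++ [(n, d, o)]) = pvGoB rest 2 (t ++ [(n, d, "low")]) := by
  simp [pvGoB]

-- at a token boundary the state does not matter
lemma pv_goB_reset (cs : List Char) (s : Nat) (acc : List (String × Int × String))
    (h : ∀ c rest, cs = c :: rest → c ≠ '_' ∧ (s = 1 → c ≠ '>' ∧ c ≠ '<')) :
    pvGoB cs s acc = pvGoB cs 0 acc := by
  cases cs with
  | nil => rfl
  | cons c rest =>
    obtain ⟨h1, h2⟩ := h c rest rfl
    have A1 : ¬ (1 ≤ s ∧ c = '_') := fun hx => h1 hx.2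
    have A2 : ¬ (s = 1 ∧ (c = '>' ∨ c = '<')) := by
      rintro ⟨hs, hc⟩
      rcases h2 hs with ⟨p, q⟩
      rcases hc with h | h
      · exact p h
      · exact q h
    simp only [pvGoB]
    rw [if_neg A1, if_neg A2, if_neg (by simp : ¬ (1 ≤ 0 ∧ c = '_')),
        if_neg (by simp : ¬ ((0:Nat) = 1 ∧ (c = '>' ∨ c = '<')))]

-- absorbing k underscores in state 2 adds k to the last duration
lemma pv_goB_und2 (k : Nat) : ∀ (rest : List Char) (n : String) (d : Int) (o : String)
    (t : List (String × Int × String)),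
    pvGoB (List.replicate k '_' ++ rest) 2 (t ++ [(n, d, o)]) =
      pvGoB rest 2 (t ++ [(n, d + (k : Int), o)]) := by
  induction k with
  | zero => intro rest n d o t; simp
  | succ k ih =>
    intro rest n d o t
    rw [List.replicate_succ, List.cons_append]
    have step : pvGoB ('_' :: (List.replicate k '_' ++ rest)) 2 (t ++ [(n, d, o)]) =
        pvGoB (List.replicate k '_' ++ rest) 2 (t ++ [(n, d + 1, o)]) := by
      simp [pvGoB]
    rw [step, ih]
    have e : d + 1 + (k : Int) = d + ((k + 1 : Nat) : Int) := by push_cast; ring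
    rw [e]

-- absorbing k underscores starting in state 1
lemma pv_goB_und1 (k : Nat) (rest : List Char) (n : String) (d : Int) (o : String)
    (t : List (String × Int × String)) :
    pvGoB (List.replicate k '_' ++ rest) 1 (t ++ [(n, d, o)]) =
      pvGoB rest (if k = 0 then 1 else 2) (t ++ [(n, d + (k : Int), o)]) := by
  cases k with
  | zero => simp
  | succ m =>
    rw [List.replicate_succ, List.cons_append]
    have step : pvGoB ('_' :: (List.replicate m '_' ++ rest)) 1 (t ++ [(n, d, o)]) =
        pvGoB (List.replicate m '_' ++ rest) 2 (t ++ [(n, d + 1, o)]) := by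
      simp [pvGoB]
    rw [step, pv_goB_und2]
    have e : d + 1 + (m : Int) = d + ((m + 1 : Nat) : Int) := by push_cast; ring
    rw [e, if_neg (by omega : ¬ (m + 1 = 0))]

-- the first character after a maximal underscore run is not '_'
lemma pv_head_not_und (cs : List Char) (j : Nat) (c' : Char) (rest' : List Char)
    (hdr : cs.drop (j + pvCountUnd cs j) = c' :: rest') : c' ≠ '_' := by
  have hlt : j + pvCountUnd cs j < cs.length := by
    by_contra hge
    rw [List.drop_eq_nil_of_le (by omega)] at hdr
    simp at hdr
  have hstop := pv_und_stop cs j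
  rw [pv_drop_cons cs _ hlt] at hdr
  intro h
  injection hdr with h1 _
  exact hstop ⟨hlt, h1.trans h⟩

-- ===== main induction =====
lemma pv_main (n : Nat) : ∀ (cs : List Char) (i : Nat) (acc : List (String × Int × String)),
    cs.length - i ≤ n → pvGoA cs i acc = pvGoB (cs.drop i) 0 acc := by
  induction n with
  | zero =>
    intro cs i acc h
    rw [pvGoA, dif_neg (by omega)]
    rw [List.drop_eq_nil_of_le (by omega)]
    rfl
  | succ n ih =>
    intro cs i acc h
    by_cases hi : i < cs.length
    · rw [pvGoA, dif_pos hi]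
      set c := cs.getD i ' ' with hc_def
      rw [pv_drop_cons cs i hi, ← hc_def]
      by_cases hsep : c = ',' ∨ c = '-'
      · rw [if_pos hsep, pv_goB_step_sep c _ acc hsep]
        exact ih cs (i+1) _ (by omega)
      · rw [if_neg hsep, pv_goB_step_note c _ acc hsep]
        by_cases hgt : i+1 < cs.length ∧ cs.getD (i+1) ' ' = '>'
        · rw [if_pos hgt]
          rw [pv_drop_cons cs (i+1) hgt.1, hgt.2, pv_goB_step_high]
          rw [show i+1+1 = i+2 from rfl, pv_und_split cs (i+2), pv_goB_und2]
          rw [pv_goB_reset _ 2 _ (fun c' rest' hdr =>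
            ⟨pv_head_not_und cs (i+2) c' rest' hdr, fun h2 => absurd h2 (by decide)⟩)]
          exact ih cs (i+2 + pvCountUnd cs (i+2)) _ (by omega)
        · rw [if_neg hgt]
          by_cases hlt : i+1 < cs.length ∧ cs.getD (i+1) ' ' = '<'
          · rw [if_pos hlt]
            rw [pv_drop_cons cs (i+1) hlt.1, hlt.2, pv_goB_step_low]
            rw [show i+1+1 = i+2 from rfl, pv_und_split cs (i+2), pv_goB_und2]
            rw [pv_goB_reset _ 2 _ (fun c' rest' hdr =>
              ⟨pv_head_not_und cs (i+2) c' rest' hdr, fun h2 => absurd h2 (by decide)⟩)]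
            exact ih cs (i+2 + pvCountUnd cs (i+2)) _ (by omega)
          · rw [if_neg hlt]
            rw [pv_und_split cs (i+1), pv_goB_und1]
            rw [pv_goB_reset _ _ _ ?_]
            · exact ih cs (i+1 + pvCountUnd cs (i+1)) _ (by omega)
            · intro c' rest' hdr
              refine ⟨pv_head_not_und cs (i+1) c' rest' hdr, fun hs => ?_⟩
              have hk0 : pvCountUnd cs (i+1) = 0 := by
                by_contra hne
                rw [if_neg hne] at hs
                exact absurd hs (by decide)
              rw [hk0] at hdr
              have hlt1 : i + 1 < cs.length := by
                by_contra hge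
                rw [List.drop_eq_nil_of_le (by omega)] at hdr
                simp at hdr
              rw [pv_drop_cons cs (i+1) hlt1] at hdr
              injection hdr with h1 _
              constructor
              · intro hgt'
                exact hgt ⟨hlt1, h1.trans hgt'⟩
              · intro hlt'
                exact hlt ⟨hlt1, h1.trans hlt'⟩
    · rw [pvGoA, dif_neg hi]
      rw [List.drop_eq_nil_of_le (by omega)]
      rfl

-- ===== VERDICT (by name: the statement is the Claim_ definition above) =====
theorem parse_notes_input_spec : Claim_equal_parse_notes_input := by
  intro s _
  unfold Spec_parse_notes_input parse_notes_input parse_notes_input_alt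
  have := pv_main (PySem.Str.strip s).toList.length (PySem.Str.strip s).toList 0 [] (by omega)
  simpa using this
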